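-- pv_equiv track=rewrite | github.com/messiel12pr/LeetCode | Python/Easy/Circular_Sentence.py | isCircularSentence
-- ===== SOURCE A (Python) =====
-- def isCircularSentence(sentence: str) -> bool:
--     sentence = sentence.split()
--     if sentence[0][0] != sentence[-1][-1]:
--         return False
--
--     for i in range(len(sentence) - 1):
--         if sentence[i][-1] != sentence[i+1][0]:
--             return False
--
--     return True
-- ===== SOURCE B (Python) =====
-- def isCircularSentence(sentence: str) -> bool:
--     first = None
--     prev = None
--     gap = False
--     ok = True
--     for c in sentence:
--         if c.isspace():
--             gap = prev is not None
--         else: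
--             if first is None:
--                 first = c
--             elif gap and prev != c:
--                 ok = False
--             gap = False
--             prev = c
--     return ok and first == prev
-- ===== Notes on version B (the rewrite author's own statement) =====
-- stated objective: alternative
-- what changed: B never builds the word list: instead of split() plus a wrap-around guard and an index loop over adjacent word pairs, it makes a single character-level scan of the raw string, carrying (first char seen, previous non-space char, whitespace-gap flag, ok flag) and checking each word boundary as it is crossed.
import Mathlib
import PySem

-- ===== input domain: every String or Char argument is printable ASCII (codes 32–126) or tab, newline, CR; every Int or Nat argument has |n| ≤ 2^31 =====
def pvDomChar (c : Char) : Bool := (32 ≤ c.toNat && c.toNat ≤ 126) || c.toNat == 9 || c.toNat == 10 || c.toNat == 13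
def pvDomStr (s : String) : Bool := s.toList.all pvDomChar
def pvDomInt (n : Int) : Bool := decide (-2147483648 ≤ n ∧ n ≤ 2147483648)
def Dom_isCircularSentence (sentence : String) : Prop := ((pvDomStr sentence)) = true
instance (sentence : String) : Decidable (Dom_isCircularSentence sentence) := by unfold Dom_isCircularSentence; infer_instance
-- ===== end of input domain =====

-- B replaces A's split-into-words plus guard-and-index-loop with a single character-level
-- scan that never builds the word list; same O(n) cost, different algorithm (objective: alternative).

-- ===== PORT A =====
-- w[0] on a Python str (a one-character string; compared only for equality, so a Char is exact)
def pvF0 (w : String) : Char := PySem.List.pyGetD w.toList 0 ' '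
-- w[-1] on a Python str
def pvFl (w : String) : Char := PySem.List.pyGetD w.toList (-1) ' '

def isCircularSentence (sentence : String) : Bool :=
  let ws := PySem.Str.split₀ sentence
  if pvF0 (PySem.List.pyGetD ws 0 "") ≠ pvFl (PySem.List.pyGetD ws (-1) "") then false
  else
    (PySem.List.pyRange 0 ((ws.length : Int) - 1) 1).all
      (fun i => pvFl (PySem.List.pyGetD ws i "") == pvF0 (PySem.List.pyGetD ws (i + 1) ""))

-- ===== PORT B =====
-- one step of Source B's for-loop; state = (first, prev, gap, ok)
def bStep (st : Option Char × Option Char × Bool × Bool) (c : Char) :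
    Option Char × Option Char × Bool × Bool :=
  match st with
  | (first, prev, gap, ok) =>
    if PySem.Chars.isspace c then (first, prev, prev.isSome, ok)
    else
      match first with
      | none => (some c, some c, false, ok)
      | some f => (some f, some c, false, if gap && prev != some c then false else ok)

def isCircularSentence_alt (sentence : String) : Bool :=
  match sentence.toList.foldl bStep (none, none, false, true) with
  | (first, prev, _, ok) => ok && (first == prev)

-- ===== PRECONDITION & SPEC =====
-- A raises IndexError exactly when sentence.split() is empty (empty or all-whitespace input):
-- Pre_ excludes those inputs.
def Pre_isCircularSentence (sentence : String) : Prop := PySem.Str.split₀ sentence ≠ []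
instance (sentence : String) : Decidable (Pre_isCircularSentence sentence) := by unfold Pre_isCircularSentence; infer_instance
def pvWitness_isCircularSentence : String := "ab ba"

def Spec_isCircularSentence (sentence : String) (out : Bool) : Prop := out = isCircularSentence_alt sentence
instance (sentence : String) (out : Bool) : Decidable (Spec_isCircularSentence sentence out) := by unfold Spec_isCircularSentence; infer_instance

-- ===== CLAIM (what is proved, stated in full; the proofs are below) =====
def Claim_equal_isCircularSentence : Prop := ∀ (sentence : String), Dom_isCircularSentence sentence → Pre_isCircularSentence sentence → Spec_isCircularSentence sentence (isCircularSentence sentence)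

-- ===== LEMMAS AND PROOFS =====

-- proof-side view of split₀'s worker with empty accumulator
def pvGo (cs cur : List Char) : List (List Char) := PySem.Chars.split₀.go cs cur []

-- pairwise last/first chain over a word list
def pvChain : List (List Char) → Bool
  | [] => true
  | [_] => true
  | a :: b :: t => (a.getLast? == b.head?) && pvChain (b :: t)

-- chain preceded by a dangling last char p (the word just closed)
def pvLink (p : Char) : List (List Char) → Bool
  | [] => true
  | w :: t => (w.head? == some p) && pvChain (w :: t)

-- last char of the last word, default p
def pvEnd (p : Char) (ws : List (List Char)) : Char := ((ws.getLast?.bind List.getLast?).getD p)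

theorem pv_go_acc (cs : List Char) : ∀ cur acc,
    PySem.Chars.split₀.go cs cur acc = acc.reverse ++ pvGo cs cur := by
  induction cs with
  | nil =>
    intro cur acc
    simp only [pvGo, PySem.Chars.split₀.go]
    by_cases h : cur.isEmpty <;> simp [h]
  | cons c rest ih =>
    intro cur acc
    simp only [pvGo, PySem.Chars.split₀.go]
    by_cases hs : PySem.Chars.isspace c <;> by_cases hc : cur.isEmpty <;>
      simp [hs, hc, ih]

theorem pv_nonnil (cs : List Char) : ∀ cur w, w ∈ pvGo cs cur → w ≠ [] := by
  induction cs with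
  | nil =>
    intro cur w hw
    simp only [pvGo, PySem.Chars.split₀.go] at hw
    by_cases hc : cur.isEmpty <;> simp [hc] at hw
    · subst hw; simpa [List.isEmpty_iff] using hc
  | cons c rest ih =>
    intro cur w hw
    simp only [pvGo, PySem.Chars.split₀.go] at hw
    by_cases hs : PySem.Chars.isspace c <;> by_cases hc : cur.isEmpty <;>
      simp only [hs, hc, if_true, if_false, Bool.false_eq_true] at hw
    · exact ih [] w hw
    · rw [pv_go_acc] at hw
      simp at hw
      rcases hw with h | h
      · subst h; simpa [List.isEmpty_iff] using hc
      · exact ih [] w h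
    · exact ih _ w hw
    · exact ih _ w hw

theorem pv_ne_nil (cs : List Char) : ∀ cur, cur ≠ [] → pvGo cs cur ≠ [] := by
  induction cs with
  | nil =>
    intro cur h
    simp [pvGo, PySem.Chars.split₀.go, List.isEmpty_iff, h]
  | cons c rest ih =>
    intro cur h
    simp only [pvGo, PySem.Chars.split₀.go]
    by_cases hs : PySem.Chars.isspace c <;>
      simp only [hs, List.isEmpty_iff, h, if_true, if_false, Bool.false_eq_true]
    · rw [pv_go_acc]
      simp
    · exact ih _ (by simp)

theorem pv_head_go (cs : List Char) : ∀ cur, cur ≠ [] →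
    (pvGo cs cur).head?.bind List.head? = cur.getLast? := by
  induction cs with
  | nil =>
    intro cur h
    simp [pvGo, PySem.Chars.split₀.go, List.isEmpty_iff, h, List.head?_reverse]
  | cons c rest ih =>
    intro cur h
    simp only [pvGo, PySem.Chars.split₀.go]
    by_cases hs : PySem.Chars.isspace c <;>
      simp only [hs, List.isEmpty_iff, h, if_true, if_false, Bool.false_eq_true]
    · rw [pv_go_acc]
      simp [List.head?_reverse]
    · rw [show PySem.Chars.split₀.go rest (c :: cur) [] = pvGo rest (c :: cur) from rfl,
        ih _ (by simp)]
      cases cur with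
      | nil => exact absurd rfl h
      | cons x xs => simp [List.getLast?_cons_cons]

theorem pv_end_irrel (p q : Char) (ws : List (List Char)) (h : ws ≠ [])
    (hn : ∀ w ∈ ws, w ≠ []) : pvEnd p ws = pvEnd q ws := by
  unfold pvEnd
  have hw : ws.getLast? = some (ws.getLast h) := List.getLast?_eq_some_getLast h
  rw [hw]
  have hwm : ws.getLast h ∈ ws := List.getLast_mem h
  obtain ⟨y, ys, hys⟩ := List.exists_cons_of_ne_nil (hn _ hwm)
  rw [hys]
  simp only [Option.bind_some, List.getLast?_eq_some_getLast (by simp : (y :: ys) ≠ [])]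
  simp

theorem pv_chain_iff (L : List (List Char)) :
    pvChain L = true ↔ ∀ i (_ : i + 1 < L.length), L[i].getLast? = L[i+1].head? := by
  induction L with
  | nil => simp [pvChain]
  | cons a t ih =>
    cases t with
    | nil => simp [pvChain]
    | cons b t2 =>
      simp only [pvChain, Bool.and_eq_true, beq_iff_eq, ih]
      constructor
      · rintro ⟨h1, h2⟩ i hi
        cases i with
        | zero => simpa using h1
        | succ j => exact h2 j (by simpa using hi)
      · intro h
        refine ⟨by simpa using h 0 (by simp), fun i hi => ?_⟩
        have := h (i+1) (by simpa using hi)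
        simpa using this

theorem pv_aAll_eq_chain (L : List (List Char)) (hn : ∀ w ∈ L, w ≠ []) :
    ((PySem.List.pyRange 0 (((L.map String.ofList).length : Int) - 1) 1).all
      (fun i => pvFl (PySem.List.pyGetD (L.map String.ofList) i "")
             == pvF0 (PySem.List.pyGetD (L.map String.ofList) (i + 1) "")))
    = pvChain L := by
  rw [Bool.eq_iff_iff, List.all_eq_true, pv_chain_iff]
  have hlen : (L.map String.ofList).length = L.length := by simp
  have key : ∀ (i : Nat) (hi : i + 1 < L.length),
      ((pvFl (PySem.List.pyGetD (L.map String.ofList) (i : Int) "")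
        == pvF0 (PySem.List.pyGetD (L.map String.ofList) ((i : Int) + 1) "")) = true
       ↔ (L[i]'(by omega)).getLast? = (L[i+1]'hi).head?) := by
    intro i hi
    have h1 : ((i : Int)) < ((L.map String.ofList).length : Int) := by
      rw [hlen]; omega
    have h2 : ((i : Int) + 1) < ((L.map String.ofList).length : Int) := by
      rw [hlen]; omega
    rw [PySem.List.pyGetD_eq_getElem _ _ (by positivity) h1,
        PySem.List.pyGetD_eq_getElem _ _ (by positivity) h2]
    have e1 : ((i : Int)).toNat = i := by omega
    have e2 : ((i : Int) + 1).toNat = i + 1 := by omega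
    simp only [e1, e2, List.getElem_map]
    have hi0 : i < L.length := by omega
    have hni : L[i] ≠ [] := hn _ (List.getElem_mem _)
    have hni1 : L[i+1] ≠ [] := hn _ (List.getElem_mem _)
    unfold pvFl pvF0
    rw [String.toList_ofList, String.toList_ofList,
        PySem.List.pyGetD_neg_one _ _ hni,
        PySem.List.pyGetD_eq_getElem _ _ (by omega) (by exact_mod_cast List.length_pos_of_ne_nil hni1)]
    rw [List.getLast?_eq_some_getLast hni, List.head?_eq_getElem?,
        List.getElem?_eq_getElem (List.length_pos_of_ne_nil hni1)]
    simp
  constructor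
  · intro h i hi
    have := h (i : Int) (by
      rw [PySem.List.mem_pyRange_one]
      refine ⟨by positivity, by rw [hlen]; omega⟩)
    exact (key i hi).mp this
  · intro h i hi
    rw [PySem.List.mem_pyRange_one] at hi
    obtain ⟨h0, h1⟩ := hi
    rw [hlen] at h1
    have hi' : i.toNat + 1 < L.length := by omega
    have e : ((i.toNat : Int)) = i := by omega
    rw [← e]
    exact (key i.toNat hi').mpr (h i.toNat hi')

theorem pvGo_nil (cur : List Char) :
    pvGo [] cur = if cur.isEmpty then [] else [cur.reverse] := by
  simp only [pvGo, PySem.Chars.split₀.go]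
  by_cases h : cur.isEmpty <;> simp [h]

theorem pvGo_cons_space (c : Char) (rest cur : List Char) (hs : PySem.Chars.isspace c = true) :
    pvGo (c :: rest) cur = if cur.isEmpty then pvGo rest [] else cur.reverse :: pvGo rest [] := by
  simp only [pvGo, PySem.Chars.split₀.go, hs, if_true]
  by_cases h : cur.isEmpty <;> simp only [h, if_true, if_false, Bool.false_eq_true]
  rw [pv_go_acc]; simp; rfl

theorem pvGo_cons_nonspace (c : Char) (rest cur : List Char)
    (hs : PySem.Chars.isspace c = false) :
    pvGo (c :: rest) cur = pvGo rest (c :: cur) := by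
  simp [pvGo, PySem.Chars.split₀.go, hs]

theorem pv_bMain (cs : List Char) :
    (∀ f p ok, ∃ g, List.foldl bStep (some f, some p, true, ok) cs =
        (some f, some (pvEnd p (pvGo cs [])), g, ok && pvLink p (pvGo cs [])))
    ∧ (∀ f c cur ok, ∃ g, List.foldl bStep (some f, some c, false, ok) cs =
        (some f, some (pvEnd c (pvGo cs (c :: cur))), g, ok && pvChain (pvGo cs (c :: cur)))) := by
  induction cs with
  | nil =>
    constructor
    · intro f p ok
      exact ⟨true, by simp [pvGo_nil, pvEnd, pvLink]⟩
    · intro f c cur ok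
      refine ⟨false, ?_⟩
      simp [pvGo_nil, pvEnd, pvChain, List.getLast?_reverse]
  | cons a rest ih =>
    constructor
    · -- gap state
      intro f p ok
      by_cases hs : PySem.Chars.isspace a
      · -- stays in gap state
        simp only [List.foldl_cons, bStep, hs, if_true, Option.isSome_some,
          pvGo_cons_space a rest [] hs, List.isEmpty_nil, if_true]
        exact ih.1 f p ok
      · -- starts a new word [a]
        have hs' : PySem.Chars.isspace a = false := by simpa using hs
        simp only [List.foldl_cons, bStep, hs', Bool.false_eq_true, if_false, Bool.true_and,
          pvGo_cons_nonspace a rest [] hs']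
        obtain ⟨g, hg⟩ := ih.2 f a [] (if (some p != some a) then false else ok)
        refine ⟨g, ?_⟩
        rw [hg]
        have hne : pvGo rest [a] ≠ [] := pv_ne_nil rest [a] (by simp)
        have hnn : ∀ w ∈ pvGo rest [a], w ≠ [] := pv_nonnil rest [a]
        obtain ⟨w, t, hwt⟩ := List.exists_cons_of_ne_nil hne
        have hhd : w.head? = some a := by
          have := pv_head_go rest [a] (by simp)
          rw [hwt] at this; simpa using this
        rw [pv_end_irrel a p _ hne hnn]
        simp only [Prod.mk.injEq, true_and]
        rw [hwt]
        simp only [pvLink, hhd]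
        cases ok <;> by_cases hpa : p = a
        · simp [hpa]
        · simp [hpa]
        · simp [hpa]
        · simp [hpa]; exact fun h => absurd h.symm hpa
    · -- in-word state
      intro f c cur ok
      by_cases hs : PySem.Chars.isspace a
      · -- word c::cur closes
        simp only [List.foldl_cons, bStep, hs, if_true, Option.isSome_some,
          pvGo_cons_space a rest (c :: cur) hs, List.isEmpty_cons, if_false, Bool.false_eq_true]
        obtain ⟨g, hg⟩ := ih.1 f c ok
        refine ⟨g, ?_⟩
        rw [hg]
        simp only [Prod.mk.injEq, true_and]
        constructor
        · -- pvEnd agrees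
          cases hgo : pvGo rest [] with
          | nil => simp [pvEnd]
          | cons w1 t1 => simp [pvEnd, List.getLast?_cons_cons]
        · -- ok component
          cases hgo : pvGo rest [] with
          | nil => simp [pvLink, pvChain]
          | cons w1 t1 =>
            simp only [pvLink, pvChain, List.getLast?_reverse, List.head?_cons]
            have : (w1.head? == some c) = (some c == w1.head?) := by
              cases hw1 : w1.head? <;> simp [BEq.comm]
            rw [this]
      · -- word continues with a
        have hs' : PySem.Chars.isspace a = false := by simpa using hs
        simp only [List.foldl_cons, bStep, hs', Bool.false_eq_true, if_false,
          Bool.false_and, pvGo_cons_nonspace a rest (c :: cur) hs']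
        obtain ⟨g, hg⟩ := ih.2 f a (c :: cur) ok
        refine ⟨g, ?_⟩
        rw [hg]
        have hne : pvGo rest (a :: c :: cur) ≠ [] := pv_ne_nil rest _ (by simp)
        have hnn := pv_nonnil rest (a :: c :: cur)
        rw [pv_end_irrel a c _ hne hnn]

theorem pv_bInit (cs : List Char) :
    (pvGo cs [] = [] → List.foldl bStep (none, none, false, true) cs = (none, none, false, true))
    ∧ (∀ w t, pvGo cs [] = w :: t → ∃ g, List.foldl bStep (none, none, false, true) cs =
        (w.head?, some (pvEnd ' ' (w :: t)), g, pvChain (w :: t))) := by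
  induction cs with
  | nil =>
    refine ⟨fun _ => rfl, fun w t h => ?_⟩
    rw [pvGo_nil] at h; simp at h
  | cons a rest ih =>
    by_cases hs : PySem.Chars.isspace a
    · have hg : pvGo (a :: rest) [] = pvGo rest [] := by
        rw [pvGo_cons_space a rest [] hs]; simp
      have hf : List.foldl bStep (none, none, false, true) (a :: rest)
          = List.foldl bStep (none, none, false, true) rest := by
        simp [bStep, hs]
      rw [hg, hf]
      exact ih
    · have hs' : PySem.Chars.isspace a = false := by simpa using hs
      have hg : pvGo (a :: rest) [] = pvGo rest [a] := pvGo_cons_nonspace a rest [] hs'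
      have hne : pvGo rest [a] ≠ [] := pv_ne_nil rest [a] (by simp)
      constructor
      · intro h; rw [hg] at h; exact absurd h hne
      · intro w t hwt
        rw [hg] at hwt
        have hf : List.foldl bStep (none, none, false, true) (a :: rest)
            = List.foldl bStep (some a, some a, false, true) rest := by
          simp [bStep, hs']
        obtain ⟨g, hgr⟩ := (pv_bMain rest).2 a a [] true
        refine ⟨g, ?_⟩
        rw [hf, hgr, hwt]
        have hhd : w.head? = some a := by
          have := pv_head_go rest [a] (by simp)
          rw [hwt] at this; simpa using this
        have hnn : ∀ x ∈ pvGo rest [a], x ≠ [] := pv_nonnil rest [a]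
        rw [hwt] at hnn
        rw [show pvEnd a (w :: t) = pvEnd ' ' (w :: t) from
          pv_end_irrel a ' ' (w :: t) (by simp) hnn]
        simp [hhd]

theorem pv_final (s : String) (hpre : Pre_isCircularSentence s) :
    isCircularSentence s = isCircularSentence_alt s := by
  have hsplit : PySem.Str.split₀ s = (pvGo s.toList []).map String.ofList := rfl
  have hLne : pvGo s.toList [] ≠ [] := by
    intro h
    exact hpre (by rw [hsplit, h]; rfl)
  obtain ⟨w, t, hwt⟩ := List.exists_cons_of_ne_nil hLne
  have hnn : ∀ x ∈ pvGo s.toList [], x ≠ [] := pv_nonnil s.toList []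
  rw [hwt] at hnn
  have hwne : w ≠ [] := hnn w (by simp)
  obtain ⟨x, xs, rfl⟩ := List.exists_cons_of_ne_nil hwne
  -- B side
  obtain ⟨g, hB⟩ := (pv_bInit s.toList).2 _ t hwt
  have hBval : isCircularSentence_alt s =
      (pvChain ((x :: xs) :: t) && (some x == some (pvEnd ' ' ((x :: xs) :: t)))) := by
    unfold isCircularSentence_alt
    rw [hB]
    simp
  -- last word and its last char
  have hlast : ∃ lw : List Char, ((x :: xs) :: t).getLast? = some lw ∧ lw ≠ [] := by
    refine ⟨((x :: xs) :: t).getLast (by simp), List.getLast?_eq_some_getLast _, ?_⟩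
    exact hnn _ (List.getLast_mem _)
  obtain ⟨lw, hlw, hlwne⟩ := hlast
  have hend : pvEnd ' ' ((x :: xs) :: t) = lw.getLast hlwne := by
    unfold pvEnd
    rw [hlw]
    simp [List.getLast?_eq_some_getLast hlwne]
  -- A side
  have hA0 : pvF0 (PySem.List.pyGetD (((x :: xs) :: t).map String.ofList) 0 "") = x := by
    simp [pvF0, PySem.List.pyGetD_zero_cons, String.toList_ofList]
  have hAl : pvFl (PySem.List.pyGetD (((x :: xs) :: t).map String.ofList) (-1) "")
      = lw.getLast hlwne := by
    rw [PySem.List.pyGetD_neg_one _ _ (by simp)]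
    have hm : (((x :: xs) :: t).map String.ofList).getLast (by simp) = String.ofList lw := by
      have h1 := List.getLast?_eq_some_getLast
        (l := ((x :: xs) :: t).map String.ofList) (by simp)
      rw [List.getLast?_map, hlw] at h1
      exact (Option.some_injective _ h1.symm)
    rw [hm]
    simp only [pvFl, String.toList_ofList]
    rw [PySem.List.pyGetD_neg_one _ _ hlwne]
  -- assemble
  rw [hBval, hend]
  unfold isCircularSentence
  rw [hsplit, hwt]
  simp only [pv_aAll_eq_chain _ hnn, hA0, hAl]
  by_cases hx : x = lw.getLast hlwne <;> simp [hx]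

-- ===== VERDICT (by name: the statement is the Claim_ definition above) =====
theorem isCircularSentence_spec : Claim_equal_isCircularSentence := by
  intro s _ hpre
  exact pv_final s hpre
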